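-- pv_equiv track=rewrite | github.com/Crow11111/MTHO_CORE | src/scripts/run_scout_mx.py | _pick_scout_mx
-- ===== SOURCE A (Python) =====
-- SCOUT_MX_PRIO = [
--     "camera.scout_mx",
--     "camera.mx",
--     "camera.usb_scout",
--     "camera.local_mx",
-- ]
--
-- SCOUT_MX_KEYWORDS = ("scout", "mx")
--
-- def _is_plausible_scout_mx(ent):
--     eid = (ent["entity_id"] or "").lower()
--     fn = ((ent.get("friendly_name") or "") or "").lower()
--     text = f"{eid} {fn}"
--     if eid in SCOUT_MX_PRIO or any(eid == p for p in SCOUT_MX_PRIO):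
--         return True
--     if any(k in text for k in SCOUT_MX_KEYWORDS):
--         return True
--     return False
--
-- def _score_entity(ent):
--     eid = (ent["entity_id"] or "").lower()
--     fn = ((ent.get("friendly_name") or "") or "").lower()
--     text = f"{eid} {fn}"
--     if eid in SCOUT_MX_PRIO:
--         return (0, SCOUT_MX_PRIO.index(eid), text)
--     for i, p in enumerate(SCOUT_MX_PRIO):
--         if p in eid:
--             return (0, i, text)
--     if any(k in text for k in SCOUT_MX_KEYWORDS):
--         return (1, 0, text)
--     return (2, 0, text)
--
-- def _pick_scout_mx(cameras):
--     candidates = [c for c in cameras if _is_plausible_scout_mx(c)]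
--     if not candidates:
--         return None
--     if len(candidates) == 1:
--         return candidates[0]["entity_id"]
--     scored = [(e, _score_entity(e)) for e in candidates]
--     scored.sort(key=lambda x: (x[1][0], x[1][1], x[1][2]))
--     return scored[0][0]["entity_id"]
-- ===== SOURCE B (Python) =====
-- # B: one classification pass (plausibility folded into the score: every priority id
-- # contains a keyword, so the exact-match checks of A are redundant), then a single
-- # first-minimum selection loop instead of filter + scored list + sort.
--
-- SCOUT_MX_PRIO = [
--     "camera.scout_mx",
--     "camera.mx",
--     "camera.usb_scout",
--     "camera.local_mx",
-- ]
--
-- SCOUT_MX_KEYWORDS = ("scout", "mx")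
--
-- def _classify(ent):
--     eid = (ent["entity_id"] or "").lower()
--     fn = (ent.get("friendly_name") or "").lower()
--     text = eid + " " + fn
--     if all(k not in text for k in SCOUT_MX_KEYWORDS):
--         return None
--     for i, p in enumerate(SCOUT_MX_PRIO):
--         if p in eid:
--             return (0, i, text)
--     return (1, 0, text)
--
-- def _pick_scout_mx(cameras):
--     best = None
--     for c in cameras:
--         s = _classify(c)
--         if s is not None and (best is None or s < best[0]):
--             best = (s, c["entity_id"])
--     return None if best is None else best[1]
-- ===== Notes on version B (the rewrite author's own statement) =====
-- stated objective: alternative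
-- what changed: B folds plausibility into a single classification function (dropping A's redundant exact-priority checks, since every priority id contains a keyword and the substring scan finds an exact match at the same index) and picks the winner in one explicit first-minimum selection loop instead of A's filter + materialised scored list + stable sort + take-first.
import Mathlib
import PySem

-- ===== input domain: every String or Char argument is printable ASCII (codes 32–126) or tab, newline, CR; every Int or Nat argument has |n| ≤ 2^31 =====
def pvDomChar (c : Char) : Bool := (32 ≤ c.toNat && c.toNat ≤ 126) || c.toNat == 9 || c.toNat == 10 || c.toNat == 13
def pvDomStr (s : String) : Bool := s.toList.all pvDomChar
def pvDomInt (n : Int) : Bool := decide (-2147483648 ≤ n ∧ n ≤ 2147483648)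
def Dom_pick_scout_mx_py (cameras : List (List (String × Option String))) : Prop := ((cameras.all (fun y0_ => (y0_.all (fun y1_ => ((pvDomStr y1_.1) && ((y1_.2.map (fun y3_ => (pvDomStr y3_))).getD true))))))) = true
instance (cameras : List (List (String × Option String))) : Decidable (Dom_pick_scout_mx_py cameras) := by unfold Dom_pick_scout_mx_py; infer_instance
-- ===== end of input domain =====

-- ===== PORT A =====
-- B folds plausibility into one classification (A's exact-priority checks are redundant)
-- and selects the winner in one first-minimum loop instead of filter + sort; same value (proved).
-- Shared module constants.
def scoutPrio : List String :=
  ["camera.scout_mx", "camera.mx", "camera.usb_scout", "camera.local_mx"]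

def scoutKeywords : List String := ["scout", "mx"]

-- (ent["entity_id"] or "").lower()   (missing key = KeyError, excluded by Pre_)
def entEid (ent : List (String × Option String)) : String :=
  PySem.Str.lower ((((PySem.Dict.mk ent).get? "entity_id").getD none).getD "")

-- ((ent.get("friendly_name") or "") or "").lower()
def entFn (ent : List (String × Option String)) : String :=
  PySem.Str.lower ((((PySem.Dict.mk ent).get? "friendly_name").getD none).getD "")

-- f"{eid} {fn}"
def entText (ent : List (String × Option String)) : String :=
  entEid ent ++ " " ++ entFn ent

-- raw ent["entity_id"] value, as returned (may be Python None = none)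
def entIdVal (ent : List (String × Option String)) : Option String :=
  ((PySem.Dict.mk ent).get? "entity_id").getD none

def isPlausibleScoutMx (ent : List (String × Option String)) : Bool :=
  let eid := entEid ent
  let text := entText ent
  if scoutPrio.contains eid || scoutPrio.any (fun p => eid == p) then true
  else if scoutKeywords.any (fun k => PySem.Str.isIn k text) then true
  else false

-- Python tuple keys compare lexicographically: modelled by the nested Lex order.
def pvKey (t : Int × Int × String) : Int ×ₗ (Int ×ₗ String) :=
  toLex (t.1, toLex (t.2.1, t.2.2))

def scoreEntity (ent : List (String × Option String)) : Int × Int × String :=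
  let eid := entEid ent
  let text := entText ent
  if scoutPrio.contains eid then
    (0, ((PySem.List.index? scoutPrio eid).getD 0 : Nat), text)
  else
    match scoutPrio.findIdx? (fun p => PySem.Str.isIn p eid) with
    | some i => (0, (i : Int), text)
    | none =>
      if scoutKeywords.any (fun k => PySem.Str.isIn k text) then (1, 0, text)
      else (2, 0, text)

def pick_scout_mx_py (cameras : List (List (String × Option String))) : Option String :=
  let candidates := cameras.filter (fun c => isPlausibleScoutMx c)
  match candidates with
  | [] => none
  | c :: rest =>
    if rest.isEmpty then entIdVal c
    else
      let scored := (c :: rest).map (fun e => (e, scoreEntity e))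
      match PySem.List.sorted scored (fun x => pvKey x.2) false with
      | [] => none
      | (e, _) :: _ => entIdVal e

-- ===== PORT B =====
-- B's _classify: None iff no keyword occurs in "eid fn"; else tier 0 with the first
-- priority-substring index, else tier (1,0).
def pvClassify (ent : List (String × Option String)) : Option (Int × Int × String) :=
  let eid := PySem.Str.lower ((((PySem.Dict.mk ent).get? "entity_id").getD none).getD "")
  let fn := PySem.Str.lower ((((PySem.Dict.mk ent).get? "friendly_name").getD none).getD "")
  let text := eid ++ " " ++ fn
  if ["scout", "mx"].all (fun k => !(PySem.Str.isIn k text)) then none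
  else
    match ["camera.scout_mx", "camera.mx", "camera.usb_scout", "camera.local_mx"].findIdx?
        (fun p => PySem.Str.isIn p eid) with
    | some i => some ((0 : Int), (i : Int), text)
    | none => some ((1 : Int), (0 : Int), text)

-- Python's native lexicographic tuple comparison s < best[0]
def pvTupLt (a b : Int × Int × String) : Bool :=
  decide (a.1 < b.1) ||
    (a.1 == b.1 && (decide (a.2.1 < b.2.1) || (a.2.1 == b.2.1 && decide (a.2.2 < b.2.2))))

-- B's loop: keep (score, raw entity_id) of the first strictly-minimal classified camera.
def pvPickLoop :
    List (List (String × Option String)) →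
      Option ((Int × Int × String) × Option String) → Option String
  | [], best => match best with | none => none | some (_, v) => v
  | c :: cs, best =>
    match pvClassify c with
    | none => pvPickLoop cs best
    | some s =>
      match best with
      | none => pvPickLoop cs (some (s, ((PySem.Dict.mk c).get? "entity_id").getD none))
      | some (bs, bv) =>
        if pvTupLt s bs then pvPickLoop cs (some (s, ((PySem.Dict.mk c).get? "entity_id").getD none))
        else pvPickLoop cs (some (bs, bv))

def pick_scout_mx_py_alt (cameras : List (List (String × Option String))) : Option String :=
  pvPickLoop cameras none

-- ===== PRECONDITION & SPEC =====
-- Pre_ excludes exactly the inputs where Python raises KeyError: a camera dict without "entity_id".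
def Pre_pick_scout_mx_py (cameras : List (List (String × Option String))) : Prop :=
  ∀ c ∈ cameras, (PySem.Dict.mk c).contains "entity_id" = true
instance (cameras : List (List (String × Option String))) : Decidable (Pre_pick_scout_mx_py cameras) := by unfold Pre_pick_scout_mx_py; infer_instance

def pvWitness_pick_scout_mx_py : (List (List (String × Option String))) :=
  [[("entity_id", some "camera.mx")], [("entity_id", some "hall scout"), ("friendly_name", none)]]

def Spec_pick_scout_mx_py (cameras : List (List (String × Option String))) (out : Option String) : Prop := out = pick_scout_mx_py_alt cameras
instance (cameras : List (List (String × Option String))) (out : Option String) : Decidable (Spec_pick_scout_mx_py cameras out) := by unfold Spec_pick_scout_mx_py; infer_instance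

-- ===== CLAIM (what is proved, stated in full; the proofs are below) =====
def Claim_equal_pick_scout_mx_py : Prop := ∀ (cameras : List (List (String × Option String))), Dom_pick_scout_mx_py cameras → Pre_pick_scout_mx_py cameras → Spec_pick_scout_mx_py cameras (pick_scout_mx_py cameras)

-- ===== LEMMAS AND PROOFS =====
abbrev pvEnt := List (String × Option String)
abbrev pvS := pvEnt × (Int × Int × String)

-- a keyword substring of eid is a substring of "eid fn"
theorem pv_isIn_text (k : String) (ent : pvEnt) (h : PySem.Str.isIn k (entEid ent) = true) :
    PySem.Str.isIn k (entText ent) = true := by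
  rw [PySem.Str.isIn_iff_infix] at h ⊢
  unfold entText
  rw [String.toList_append, String.toList_append]
  exact h.trans ((List.prefix_append _ _).isInfix.trans (List.prefix_append _ _).isInfix)

-- every priority id contains a keyword
theorem pv_prio_keyword (ent : pvEnt) (h : scoutPrio.contains (entEid ent) = true) :
    scoutKeywords.any (fun k => PySem.Str.isIn k (entText ent)) = true := by
  have hm : entEid ent = "camera.scout_mx" ∨ entEid ent = "camera.mx" ∨
      entEid ent = "camera.usb_scout" ∨ entEid ent = "camera.local_mx" := by
    have := (List.contains_iff_mem).mp h
    simpa [scoutPrio] using this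
  simp only [scoutKeywords, List.any_cons, List.any_nil, Bool.or_eq_true]
  rcases hm with hm | hm | hm | hm
  · exact Or.inl (pv_isIn_text _ _ (by rw [hm]; decide))
  · exact Or.inr (Or.inl (pv_isIn_text _ _ (by rw [hm]; decide)))
  · exact Or.inl (pv_isIn_text _ _ (by rw [hm]; decide))
  · exact Or.inr (Or.inl (pv_isIn_text _ _ (by rw [hm]; decide)))

-- an exact priority match is found by the substring scan at the same index
theorem pv_prio_exact (ent : pvEnt) (h : scoutPrio.contains (entEid ent) = true) :
    scoutPrio.findIdx? (fun p => PySem.Str.isIn p (entEid ent)) =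
      some (((PySem.List.index? scoutPrio (entEid ent)).getD 0 : Nat)) := by
  have hm : entEid ent = "camera.scout_mx" ∨ entEid ent = "camera.mx" ∨
      entEid ent = "camera.usb_scout" ∨ entEid ent = "camera.local_mx" := by
    have := (List.contains_iff_mem).mp h
    simpa [scoutPrio] using this
  rcases hm with hm | hm | hm | hm <;> rw [hm] <;> decide

-- definitional restatements of the three functions in shared vocabulary
theorem pvClassify_def (ent : pvEnt) :
    pvClassify ent = (if scoutKeywords.all (fun k => !(PySem.Str.isIn k (entText ent))) then none
      else match scoutPrio.findIdx? (fun p => PySem.Str.isIn p (entEid ent)) with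
        | some i => some ((0:Int), (i:Int), entText ent)
        | none => some ((1:Int), (0:Int), entText ent)) := rfl

-- Python's tuple < is the nested lexicographic order
theorem pvTupLt_eq (a b : Int × Int × String) :
    pvTupLt a b = decide (pvKey a < pvKey b) := by
  rcases a with ⟨x1, y1, z1⟩
  rcases b with ⟨x2, y2, z2⟩
  simp only [pvTupLt, pvKey, Prod.Lex.toLex_lt_toLex]
  by_cases h1 : x1 < x2 <;> by_cases h2 : x1 = x2 <;> by_cases h3 : y1 < y2 <;>
    by_cases h4 : y1 = y2 <;> by_cases h5 : z1 < z2 <;> simp_all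

theorem isPlausible_def (ent : pvEnt) :
    isPlausibleScoutMx ent =
      (if scoutPrio.contains (entEid ent) || scoutPrio.any (fun p => entEid ent == p) then true
       else if scoutKeywords.any (fun k => PySem.Str.isIn k (entText ent)) then true else false) := rfl

theorem scoreEntity_def (ent : pvEnt) :
    scoreEntity ent =
      (if scoutPrio.contains (entEid ent) then
        ((0 : Int), (((PySem.List.index? scoutPrio (entEid ent)).getD 0 : Nat) : Int), entText ent)
      else match scoutPrio.findIdx? (fun p => PySem.Str.isIn p (entEid ent)) with
        | some i => ((0 : Int), (i : Int), entText ent)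
        | none => if scoutKeywords.any (fun k => PySem.Str.isIn k (entText ent)) then ((1:Int), (0:Int), entText ent)
                  else ((2:Int), (0:Int), entText ent)) := rfl

-- B's classification = (plausible?, A's score) in one function
theorem pv_classify_eq (ent : pvEnt) :
    pvClassify ent =
      (if isPlausibleScoutMx ent then some (scoreEntity ent) else none) := by
  rw [pvClassify_def, isPlausible_def, scoreEntity_def, List.any_beq, Bool.or_self]
  by_cases hc : scoutPrio.contains (entEid ent) = true
  · have hkP : ∃ x ∈ scoutKeywords, PySem.Chars.isIn x.toList (entText ent).toList = true := by
      simpa using pv_prio_keyword ent hc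
    have hcP : entEid ent ∈ scoutPrio := by simpa using hc
    have heP : List.findIdx? (fun p => PySem.Chars.isIn p.toList (entEid ent).toList) scoutPrio =
        some ((List.idxOf? (entEid ent) scoutPrio).getD 0) := by
      simpa using pv_prio_exact ent hc
    have hne : ¬ ∀ x ∈ scoutKeywords, PySem.Chars.isIn x.toList (entText ent).toList = false := by
      obtain ⟨x, hx, hxi⟩ := hkP
      intro hall
      simpa [hxi] using hall x hx
    simp [hcP, heP, hne]
  · have hcP : entEid ent ∉ scoutPrio := by simpa using hc
    by_cases hkc : scoutKeywords.any (fun k => PySem.Str.isIn k (entText ent)) = true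
    · have hkP : ∃ x ∈ scoutKeywords, PySem.Chars.isIn x.toList (entText ent).toList = true := by
        simpa using hkc
      have hne : ¬ ∀ x ∈ scoutKeywords, PySem.Chars.isIn x.toList (entText ent).toList = false := by
        obtain ⟨x, hx, hxi⟩ := hkP
        intro hall
        simpa [hxi] using hall x hx
      cases hfi : List.findIdx? (fun p => PySem.Chars.isIn p.toList (entEid ent).toList) scoutPrio with
      | some i => simp [hcP, hkP, hne, hfi]
      | none => simp [hcP, hkP, hne, hfi]
    · have hkF : ∀ x ∈ scoutKeywords, PySem.Chars.isIn x.toList (entText ent).toList = false := by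
        simpa using hkc
      have hkE : ¬ ∃ x ∈ scoutKeywords, PySem.Chars.isIn x.toList (entText ent).toList = true := by
        rintro ⟨x, hx, hxi⟩
        simpa [hxi] using hkF x hx
      simp [hcP, hkE]

-- the "keep the first strictly-smaller element" step on scored pairs
def pvMinStep (b : Option pvS) (x : pvS) : Option pvS :=
  match b with
  | none => some x
  | some h => if pvKey x.2 < pvKey h.2 then some x else some h

def pvProj (b : Option pvS) : Option ((Int × Int × String) × Option String) :=
  b.map (fun es => (es.2, entIdVal es.1))

-- B's loop = the first-minimum fold over the scored plausible cameras
theorem pv_loop_eq (cameras : List pvEnt) (b : Option pvS) :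
    pvPickLoop cameras (pvProj b) =
      (match ((cameras.filter (fun c => isPlausibleScoutMx c)).map
          (fun e => (e, scoreEntity e))).foldl pvMinStep b with
        | none => none
        | some (e, _) => entIdVal e) := by
  induction cameras generalizing b with
  | nil => cases b with | none => rfl | some h => cases h; rfl
  | cons c cs ih =>
    by_cases hp : isPlausibleScoutMx c
    · have hstep : pvPickLoop (c :: cs) (pvProj b) = pvPickLoop cs (pvProj (pvMinStep b (c, scoreEntity c))) := by
        simp only [pvPickLoop]
        rw [pv_classify_eq, if_pos hp]
        cases b with
        | none => rfl
        | some h =>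
          cases h with
          | mk e s =>
            simp only [pvProj, Option.map_some, pvMinStep]
            by_cases hb : pvTupLt (scoreEntity c) s = true
            · have hlt : pvKey (scoreEntity c) < pvKey s :=
                of_decide_eq_true ((pvTupLt_eq _ _) ▸ hb)
              rw [hb, if_pos hlt]
              simp [entIdVal]
            · have hbf : pvTupLt (scoreEntity c) s = false := by
                simpa using hb
              have hlt : ¬ pvKey (scoreEntity c) < pvKey s :=
                of_decide_eq_false ((pvTupLt_eq _ _) ▸ hbf)
              rw [hbf, if_neg hlt]
              simp [entIdVal]
      rw [hstep, ih]
      simp [hp]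
    · have hstep : pvPickLoop (c :: cs) (pvProj b) = pvPickLoop cs (pvProj b) := by
        simp only [pvPickLoop]
        rw [pv_classify_eq, if_neg hp]
      rw [hstep, ih]
      simp [hp]

-- one insertBy insertion changes the head exactly like one first-minimum step
theorem pv_insertBy_head? (x : pvS) (acc : List pvS) :
    (PySem.List.insertBy (fun a b => decide (pvKey a.2 < pvKey b.2)) x acc).head? =
      pvMinStep acc.head? x := by
  cases acc with
  | nil => simp [PySem.List.insertBy, pvMinStep]
  | cons h t =>
    by_cases hc : pvKey x.2 < pvKey h.2 <;>
      simp [PySem.List.insertBy, pvMinStep, hc]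

-- head of the insertBy-insertion-sort fold = first-minimum fold
theorem pv_head_foldl_insertBy (xs : List pvS) (acc : List pvS) :
    (xs.foldl (fun acc x => PySem.List.insertBy (fun a b => decide (pvKey a.2 < pvKey b.2)) x acc) acc).head? =
      xs.foldl pvMinStep acc.head? := by
  induction xs generalizing acc with
  | nil => rfl
  | cons x xs ih =>
    simp only [List.foldl_cons, ih, pv_insertBy_head?]

-- the two ports agree on every input
theorem pv_ports_agree (cameras : List (List (String × Option String))) :
    pick_scout_mx_py cameras = pick_scout_mx_py_alt cameras := by
  have halt : pick_scout_mx_py_alt cameras =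
      (match ((cameras.filter (fun c => isPlausibleScoutMx c)).map
          (fun e => (e, scoreEntity e))).foldl pvMinStep none with
        | none => none
        | some (e, _) => entIdVal e) := pv_loop_eq cameras none
  unfold pick_scout_mx_py
  rw [halt]
  cases hF : cameras.filter (fun c => isPlausibleScoutMx c) with
  | nil => rfl
  | cons c rest =>
    cases rest with
    | nil => rfl
    | cons c2 rest2 =>
      have hne : ((c :: c2 :: rest2).map (fun e => (e, scoreEntity e))) ≠ [] := by simp
      have hhead : (PySem.List.sorted ((c :: c2 :: rest2).map (fun e => (e, scoreEntity e)))
            (fun x : pvS => pvKey x.2) false).head? =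
          ((c :: c2 :: rest2).map (fun e => (e, scoreEntity e))).foldl pvMinStep none := by
        rw [PySem.List.sorted_eq_foldl_insertBy]
        exact pv_head_foldl_insertBy _ []
      cases hs : PySem.List.sorted ((c :: c2 :: rest2).map (fun e => (e, scoreEntity e)))
          (fun x : pvS => pvKey x.2) false with
      | nil => exact absurd ((PySem.List.sorted_eq_nil_iff _ _ _).mp hs) hne
      | cons p tl =>
        rw [hs] at hhead
        simp only [List.head?_cons] at hhead
        obtain ⟨e, s⟩ := p
        simp only [List.isEmpty_cons, Bool.false_eq_true, if_false, hs, ← hhead]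

-- ===== VERDICT (by name: the statement is the Claim_ definition above) =====
theorem pick_scout_mx_py_spec : Claim_equal_pick_scout_mx_py := by
  intro cameras _ _
  unfold Spec_pick_scout_mx_py
  exact pv_ports_agree cameras
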